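-- pv_equiv track=rewrite | github.com/EsoNes0/cs2 | cs2/recursive_string_replace.py | findandreplace
-- ===== SOURCE A (Python) =====
-- def findandreplace(find, replace, string):
--     '''
--     Replace all instances of find with replace in string.
--
--     Recursive approach:
--     If the string starts with find
--         return replace and call findandreplace with the rest of the string
--     else
--         return the first character of the string and call findandreplace
--         with the rest of the string
--     '''
--     if find:
--         a = len(find)
--     if string == "":
--         return ""
--     if string is None:
--         return None
--     if string == find:
--         return replace
--     if replace is None:
--         return string
--     if find and string[:a] == find:
--         return replace + findandreplace(find, replace, string[a:])
--     else:
--         return string[0] + findandreplace(find, replace, string[1:])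
-- ===== SOURCE B (Python) =====
-- def findandreplace(find, replace, string):
--     # Same guard cascade as the original, then an iterative scan instead of recursion.
--     if string == "":
--         return ""
--     if string is None:
--         return None
--     if string == find:
--         return replace
--     if replace is None:
--         return string
--     out = []
--     i = 0
--     n = len(string)
--     k = len(find) if find else 0
--     while i < n:
--         if find and string[i:i+k] == find:
--             out.append(replace)
--             i += k
--         else:
--             out.append(string[i])
--             i += 1
--     return "".join(out)
-- ===== Notes on version B (the rewrite author's own statement) =====
-- stated objective: faster
-- what changed: Replaced the tail recursion that rebuilds and re-concatenates the string at every level with a single iterative left-to-right index scan accumulating output pieces joined once, keeping the leading guard cascade.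
import Mathlib
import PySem

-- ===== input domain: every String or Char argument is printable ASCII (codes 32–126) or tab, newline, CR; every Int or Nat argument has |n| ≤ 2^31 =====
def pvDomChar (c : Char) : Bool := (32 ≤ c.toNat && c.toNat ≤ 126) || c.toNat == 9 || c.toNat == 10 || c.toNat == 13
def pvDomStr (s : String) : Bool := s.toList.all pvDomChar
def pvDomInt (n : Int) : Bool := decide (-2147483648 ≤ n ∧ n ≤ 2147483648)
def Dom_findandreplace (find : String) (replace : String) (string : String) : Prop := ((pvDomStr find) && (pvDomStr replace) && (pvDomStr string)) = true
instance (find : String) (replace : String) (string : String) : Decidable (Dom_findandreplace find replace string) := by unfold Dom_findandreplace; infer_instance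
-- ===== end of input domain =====

-- B replaces A's tail recursion (which rebuilds the string at every level) by one
-- iterative index scan with an output accumulator; same guard cascade, same result.
-- (A's 'string is None' and 'replace is None' branches are unreachable for String
-- arguments under the type convention, so both ports omit them.)

-- ===== PORT A =====
-- the recursive body of A, on the character lists; guards in A's order
def faCore (find replace : List Char) (string : List Char) : List Char :=
  if string = [] then []
  else if string = find then replace
  else if find ≠ [] ∧ string.take find.length = find then
    replace ++ faCore find replace (string.drop find.length)
  else
    string.take 1 ++ faCore find replace (string.drop 1)
termination_by string.length
decreasing_by
  · rename_i h1 _ h3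
    have hf : find.length ≥ 1 := by
      cases find with
      | nil => exact absurd rfl h3.1
      | cons a l => simp
    have hs : string.length ≥ 1 := by
      cases string with
      | nil => exact absurd rfl h1
      | cons a l => simp
    simp only [List.length_drop]
    omega
  · rename_i h1 _ _
    have : string.length ≥ 1 := by
      cases string with
      | nil => exact absurd rfl h1
      | cons a l => simp
    simp only [List.length_drop]
    omega

def findandreplace (find : String) (replace : String) (string : String) : Option String :=
  some (String.mk (faCore find.toList replace.toList string.toList))

-- ===== PORT B =====
-- B's while-loop: index i over string, accumulator out
def fbLoop (find replace string : List Char) (i : Nat) (out : List Char) : List Char :=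
  if i < string.length then
    if find ≠ [] ∧ (string.drop i).take find.length = find then
      fbLoop find replace string (i + find.length) (out ++ replace)
    else
      fbLoop find replace string (i + 1) (out ++ (string.drop i).take 1)
  else out
termination_by string.length - i
decreasing_by
  · rename_i h1 h2
    have : find.length ≥ 1 := by
      cases find with
      | nil => exact absurd rfl h2.1
      | cons a l => simp
    omega
  · omega

def findandreplace_alt (find : String) (replace : String) (string : String) : Option String :=
  if string = "" then some ""
  else if string = find then some replace
  else some (String.mk (fbLoop find.toList replace.toList string.toList 0 []))

-- ===== PRECONDITION & SPEC =====
def Spec_findandreplace (find : String) (replace : String) (string : String) (out : Option String) : Prop := out = findandreplace_alt find replace string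
instance (find : String) (replace : String) (string : String) (out : Option String) : Decidable (Spec_findandreplace find replace string out) := by unfold Spec_findandreplace; infer_instance

-- ===== CLAIM (what is proved, stated in full; the proofs are below) =====
def Claim_equal_findandreplace : Prop := ∀ (find : String) (replace : String) (string : String), Dom_findandreplace find replace string → Spec_findandreplace find replace string (findandreplace find replace string)

-- ===== LEMMAS AND PROOFS =====

-- the loop seen from position i computes faCore of the remaining suffix
theorem fbLoop_eq_faCore (find replace string : List Char) :
    ∀ i out, i ≤ string.length →
      fbLoop find replace string i out = out ++ faCore find replace (string.drop i) := by
  intro i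
  generalize hn : string.length - i = n
  induction n using Nat.strong_induction_on generalizing i with
  | _ n ih =>
    intro out hi
    rw [fbLoop]
    by_cases h : i < string.length
    · have hdne : string.drop i ≠ [] := by
        intro he
        have := congrArg List.length he
        simp at this
        omega
      simp only [h, if_true]
      by_cases hc : find ≠ [] ∧ (string.drop i).take find.length = find
      · have hk1 : 1 ≤ find.length := by
          cases hf : find with
          | nil => exact absurd hf hc.1
          | cons a l => simp
        have hlen : find.length ≤ string.length - i := by
          have := congrArg List.length hc.2
          simp at this
          omega
        rw [if_pos hc]
        by_cases heq : string.drop i = find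
        · -- the remainder is exactly find: one replacement ends the loop
          have hlen2 : string.length - i = find.length := by
            have := congrArg List.length heq; simpa using this
          rw [fbLoop]
          have hnl : ¬ i + find.length < string.length := by omega
          rw [if_neg hnl]
          rw [faCore]
          rw [if_neg hdne, if_pos heq]
        · rw [faCore]
          rw [if_neg hdne, if_neg heq, if_pos hc]
          rw [ih (string.length - (i + find.length)) (by omega) (i + find.length) rfl _ (by omega)]
          rw [List.drop_drop]
          simp [List.append_assoc]
      · have heq : string.drop i ≠ find := by
          intro he
          apply hc
          refine ⟨by rw [← he]; exact hdne, ?_⟩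
          rw [he, List.take_of_length_le (le_refl _)]
        rw [if_neg hc]
        rw [faCore]
        rw [if_neg hdne, if_neg heq, if_neg hc]
        rw [ih (string.length - (i + 1)) (by omega) (i + 1) rfl _ (by omega)]
        rw [List.drop_drop]
        simp [List.append_assoc]
    · rw [if_neg h]
      have : string.drop i = [] := by
        apply List.drop_eq_nil_of_le; omega
      rw [this, faCore]
      simp

-- ===== VERDICT (by name: the statement is the Claim_ definition above) =====
theorem findandreplace_spec : Claim_equal_findandreplace := by
  intro find replace string _
  unfold Spec_findandreplace findandreplace findandreplace_alt
  by_cases h0 : string = ""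
  · subst h0
    simp [faCore]
    rfl
  · rw [if_neg h0]
    by_cases h1 : string = find
    · subst h1
      rw [if_pos rfl]
      have hne : string.toList ≠ [] := by
        intro he
        apply h0
        cases string with | _ l => cases l <;> simp_all
      rw [faCore, if_neg hne, if_pos rfl]
      simp [String.mk]
    · rw [if_neg h1]
      rw [fbLoop_eq_faCore find.toList replace.toList string.toList 0 [] (by omega)]
      simp
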